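-- pv_equiv track=rewrite | github.com/LukhasAI/Lukhas | labs/core/ethics/logic/dsl_lite.py | has_category
-- ===== SOURCE A (Python) =====
-- from typing import Any, Callable, Dict, Optional
--
-- def has_category(tags: Any, category_name: str) -> bool:
--     """Check if plan has any tags in specified category."""
--     if tags is None:
--         return False
--
--     # For now, use naming convention: category-specific tag names
--     # In full integration, this would check tag category metadata
--     category_patterns = {
--         "data_sensitivity": ["pii", "financial", "health", "sensitive"],
--         "system_operation": ["model-switch", "external-call", "admin", "system"],
--         "security_risk": ["privilege-escalation", "injection", "exploit"],
--         "compliance": ["gdpr", "hipaa", "sox", "compliance"]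
--     }
--
--     if category_name not in category_patterns:
--         return False
--
--     category_tags = category_patterns[category_name]
--
--     if isinstance(tags, list):
--         return any(tag in tags for tag in category_tags)
--     elif isinstance(tags, dict):
--         return any(tag in tags for tag in category_tags)
--     elif isinstance(tags, str):
--         tag_list = tags.split(',')
--         return any(tag in tag_list for tag in category_tags)
--
--     return False
-- ===== SOURCE B (Python) =====
-- # Inverted index: category-of-tag lookup built once, then iterate the input tags.
-- _CATEGORY_OF_TAG = {
--     "pii": "data_sensitivity", "financial": "data_sensitivity",
--     "health": "data_sensitivity", "sensitive": "data_sensitivity",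
--     "model-switch": "system_operation", "external-call": "system_operation",
--     "admin": "system_operation", "system": "system_operation",
--     "privilege-escalation": "security_risk", "injection": "security_risk",
--     "exploit": "security_risk",
--     "gdpr": "compliance", "hipaa": "compliance", "sox": "compliance",
--     "compliance": "compliance",
-- }
--
-- def has_category(tags, category_name):
--     """Check if plan has any tags in specified category."""
--     if tags is None:
--         return False
--     if isinstance(tags, str):
--         tags = tags.split(',')
--     elif not isinstance(tags, (list, dict)):
--         return False
--     return any(_CATEGORY_OF_TAG.get(tag) == category_name for tag in tags)
-- ===== Notes on version B (the rewrite author's own statement) =====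
-- stated objective: alternative
-- what changed: Inverts A's category->aliases table into a tag->category index built once, and decides by a single pass over the INPUT tags looking each one up (no category-key guard, no alias-list scan), instead of fetching the category's alias list and scanning it for membership in tags.
import Mathlib
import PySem

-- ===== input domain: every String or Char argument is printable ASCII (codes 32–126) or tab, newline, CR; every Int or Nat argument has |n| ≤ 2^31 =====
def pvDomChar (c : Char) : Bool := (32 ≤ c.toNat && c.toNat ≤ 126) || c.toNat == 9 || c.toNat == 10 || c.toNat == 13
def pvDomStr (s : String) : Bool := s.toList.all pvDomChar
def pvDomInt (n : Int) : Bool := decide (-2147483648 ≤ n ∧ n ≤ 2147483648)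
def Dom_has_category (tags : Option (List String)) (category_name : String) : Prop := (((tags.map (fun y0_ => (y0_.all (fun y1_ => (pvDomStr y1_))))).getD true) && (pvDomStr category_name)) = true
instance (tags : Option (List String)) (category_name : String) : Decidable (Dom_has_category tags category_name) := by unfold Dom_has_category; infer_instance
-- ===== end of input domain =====

-- B inverts the category->aliases table into a tag->category index and scans the input tags once (alternative; same result).
-- The typed domain is Option (List String): Python's dict/str branches of both programs are unreachable here and are not ported.
-- ===== PORT A =====
def has_category (tags : Option (List String)) (category_name : String) : Bool :=
  match tags with
  | none => false
  | some l =>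
    let category_patterns : PySem.Dict String (List String) := PySem.Dict.ofList
      [("data_sensitivity", ["pii", "financial", "health", "sensitive"]),
       ("system_operation", ["model-switch", "external-call", "admin", "system"]),
       ("security_risk", ["privilege-escalation", "injection", "exploit"]),
       ("compliance", ["gdpr", "hipaa", "sox", "compliance"])]
    if !(category_patterns.contains category_name) then false
    else
      let category_tags := category_patterns.getD category_name []
      category_tags.any (fun tag => l.contains tag)

-- ===== PORT B =====
-- Source B's module-level _CATEGORY_OF_TAG literal dict
def categoryOfTag : PySem.Dict String String := PySem.Dict.ofList
  [("pii", "data_sensitivity"), ("financial", "data_sensitivity"),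
   ("health", "data_sensitivity"), ("sensitive", "data_sensitivity"),
   ("model-switch", "system_operation"), ("external-call", "system_operation"),
   ("admin", "system_operation"), ("system", "system_operation"),
   ("privilege-escalation", "security_risk"), ("injection", "security_risk"),
   ("exploit", "security_risk"),
   ("gdpr", "compliance"), ("hipaa", "compliance"), ("sox", "compliance"),
   ("compliance", "compliance")]

def has_category_alt (tags : Option (List String)) (category_name : String) : Bool :=
  match tags with
  | none => false
  | some l => l.any (fun tag => categoryOfTag.get? tag == some category_name)

-- ===== PRECONDITION & SPEC =====
def Spec_has_category (tags : Option (List String)) (category_name : String) (out : Bool) : Prop := out = has_category_alt tags category_name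
instance (tags : Option (List String)) (category_name : String) (out : Bool) : Decidable (Spec_has_category tags category_name out) := by unfold Spec_has_category; infer_instance

-- ===== CLAIM (what is proved, stated in full; the proofs are below) =====
def Claim_equal_has_category : Prop := ∀ (tags : Option (List String)) (category_name : String), Dom_has_category tags category_name → Spec_has_category tags category_name (has_category tags category_name)

-- ===== LEMMAS AND PROOFS =====

-- literal-dict views of the two dicts (proof-side only)
set_option maxHeartbeats 1600000 in
lemma cot_mk : categoryOfTag = PySem.Dict.mk
    [("pii", "data_sensitivity"), ("financial", "data_sensitivity"),
     ("health", "data_sensitivity"), ("sensitive", "data_sensitivity"),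
     ("model-switch", "system_operation"), ("external-call", "system_operation"),
     ("admin", "system_operation"), ("system", "system_operation"),
     ("privilege-escalation", "security_risk"), ("injection", "security_risk"),
     ("exploit", "security_risk"),
     ("gdpr", "compliance"), ("hipaa", "compliance"), ("sox", "compliance"),
     ("compliance", "compliance")] := by rfl

set_option maxHeartbeats 1600000 in
lemma pat_mk : (PySem.Dict.ofList [("data_sensitivity", ["pii", "financial", "health", "sensitive"]), ("system_operation", ["model-switch", "external-call", "admin", "system"]), ("security_risk", ["privilege-escalation", "injection", "exploit"]), ("compliance", ["gdpr", "hipaa", "sox", "compliance"])] : PySem.Dict String (List String)) = PySem.Dict.mk [("data_sensitivity", ["pii", "financial", "health", "sensitive"]), ("system_operation", ["model-switch", "external-call", "admin", "system"]), ("security_risk", ["privilege-escalation", "injection", "exploit"]), ("compliance", ["gdpr", "hipaa", "sox", "compliance"])] := by rfl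

set_option maxHeartbeats 800000 in
lemma cot_nodup : categoryOfTag.keys.Nodup := by rw [cot_mk]; decide

-- a lookup hit is exactly membership of the pair in the literal table
lemma rev_mem (t c : String) : categoryOfTag.get? t = some c ↔ (t, c) ∈ categoryOfTag.items := by
  apply PySem.Dict.get?_eq_some_iff_mem_items
  exact cot_nodup

-- "some alias of cat is in l" equals "some element of l maps to cat", for a listed category.
lemma alias_scan_eq_rev_scan (l : List String) (cn : String) (aliases : List String)
    (h : ∀ t : String, (categoryOfTag.get? t = some cn) ↔ t ∈ aliases) :
    aliases.any (fun tag => l.contains tag)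
      = l.any (fun tag => categoryOfTag.get? tag == some cn) := by
  rw [Bool.eq_iff_iff]
  simp only [List.any_eq_true, List.contains_iff_mem, beq_iff_eq, h]
  tauto

lemma rev_ds (t : String) : (categoryOfTag.get? t = some "data_sensitivity") ↔ t ∈ (["pii", "financial", "health", "sensitive"] : List String) := by
  rw [rev_mem, cot_mk]; simp [Prod.ext_iff]

lemma rev_so (t : String) : (categoryOfTag.get? t = some "system_operation") ↔ t ∈ (["model-switch", "external-call", "admin", "system"] : List String) := by
  rw [rev_mem, cot_mk]; simp [Prod.ext_iff]

lemma rev_sr (t : String) : (categoryOfTag.get? t = some "security_risk") ↔ t ∈ (["privilege-escalation", "injection", "exploit"] : List String) := by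
  rw [rev_mem, cot_mk]; simp [Prod.ext_iff]

lemma rev_co (t : String) : (categoryOfTag.get? t = some "compliance") ↔ t ∈ (["gdpr", "hipaa", "sox", "compliance"] : List String) := by
  rw [rev_mem, cot_mk]; simp [Prod.ext_iff]

-- every value of the reverse index is one of the four category names
lemma rev_cat_of_hit {t c : String} (h : categoryOfTag.get? t = some c) :
    c = "data_sensitivity" ∨ c = "system_operation" ∨ c = "security_risk" ∨ c = "compliance" := by
  have hm := (rev_mem t c).mp h
  rw [cot_mk] at hm
  simp [Prod.ext_iff] at hm
  tauto

-- ===== VERDICT (by name: the statement is the Claim_ definition above) =====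
set_option maxHeartbeats 1600000 in
theorem has_category_spec : Claim_equal_has_category := by
  intro tags cn _
  unfold Spec_has_category has_category has_category_alt
  cases tags with
  | none => rfl
  | some l =>
    simp only []
    by_cases h1 : cn = "data_sensitivity"
    · subst h1; exact alias_scan_eq_rev_scan l _ _ rev_ds
    · by_cases h2 : cn = "system_operation"
      · subst h2; exact alias_scan_eq_rev_scan l _ _ rev_so
      · by_cases h3 : cn = "security_risk"
        · subst h3; exact alias_scan_eq_rev_scan l _ _ rev_sr
        · by_cases h4 : cn = "compliance"
          · subst h4; exact alias_scan_eq_rev_scan l _ _ rev_co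
          · -- cn is none of the four categories: both sides are false
            rw [pat_mk]
            have hc : (PySem.Dict.mk [("data_sensitivity", ["pii", "financial", "health", "sensitive"]), ("system_operation", ["model-switch", "external-call", "admin", "system"]), ("security_risk", ["privilege-escalation", "injection", "exploit"]), ("compliance", ["gdpr", "hipaa", "sox", "compliance"])]).contains cn = false := by
              rw [PySem.Dict.contains_eq_decide_mem_keys]
              simp [PySem.Dict.keys_mk, h1, h2, h3, h4]
            rw [hc]
            simp only [Bool.not_false, if_true]
            symm
            simp only [List.any_eq_false]
            intro t _
            simp only [beq_iff_eq]
            intro hb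
            rcases rev_cat_of_hit hb with h | h | h | h
            · exact h1 h
            · exact h2 h
            · exact h3 h
            · exact h4 h
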